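-- pv_equiv track=rewrite | github.com/panpan-wu/asre2e | asre2e/ctc_demo.py | ctc_remove_blank
-- ===== SOURCE A (Python) =====
-- from typing import List
--
-- def ctc_remove_blank(
--     char_ids: List,
--     blank_id: int = 0,
-- ) -> List:
--     res = []
--     prev_char_id = blank_id
--     for char_id in char_ids:
--         if char_id != blank_id and char_id != prev_char_id:
--             res.append(char_id)
--         prev_char_id = char_id
--     return res
-- ===== SOURCE B (Python) =====
-- from itertools import groupby
--
-- def ctc_remove_blank(char_ids, blank_id=0):
--     return [k for k, _ in groupby(char_ids) if k != blank_id]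
-- ===== Notes on version B (the rewrite author's own statement) =====
-- stated objective: idiomatic
-- what changed: Replaces the explicit prev-state scan with the classic two-stage CTC decode: itertools.groupby collapses consecutive duplicates and a comprehension filters out the blank id.
import Mathlib
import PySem

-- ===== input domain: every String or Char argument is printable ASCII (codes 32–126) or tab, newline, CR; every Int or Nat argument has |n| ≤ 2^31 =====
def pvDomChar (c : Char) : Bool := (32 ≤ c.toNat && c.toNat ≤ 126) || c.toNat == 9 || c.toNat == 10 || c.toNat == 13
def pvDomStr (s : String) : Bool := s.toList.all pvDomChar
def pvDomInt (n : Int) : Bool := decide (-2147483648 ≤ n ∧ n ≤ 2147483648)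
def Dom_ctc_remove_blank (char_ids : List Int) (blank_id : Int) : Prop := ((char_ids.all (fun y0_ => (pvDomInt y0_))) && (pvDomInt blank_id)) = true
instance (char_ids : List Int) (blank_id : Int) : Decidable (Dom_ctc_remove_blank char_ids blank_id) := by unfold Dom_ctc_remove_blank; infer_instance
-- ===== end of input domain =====

-- B replaces A's prev-state scan by the two-stage CTC decode: collapse consecutive
-- duplicate runs (groupby), then filter out the blank id (idiomatic; same cost).

-- ===== PORT A =====
-- A's loop: state (res, prev_char_id), appending when char_id ≠ blank and ≠ prev.
def ctc_remove_blank (char_ids : List Int) (blank_id : Int) : List Int :=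
  (char_ids.foldl
    (fun (st : List Int × Int) char_id =>
      (if char_id ≠ blank_id ∧ char_id ≠ st.2 then st.1 ++ [char_id] else st.1, char_id))
    ([], blank_id)).1

-- ===== PORT B =====
-- groupby: keep one representative (the first element) of each run of equal values.
def ctcGroupKeys : List Int → List Int
  | [] => []
  | [x] => [x]
  | x :: y :: t => if x = y then ctcGroupKeys (y :: t) else x :: ctcGroupKeys (y :: t)

def ctc_remove_blank_alt (char_ids : List Int) (blank_id : Int) : List Int :=
  (ctcGroupKeys char_ids).filter (fun k => k ≠ blank_id)

-- ===== PRECONDITION & SPEC =====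
def Spec_ctc_remove_blank (char_ids : List Int) (blank_id : Int) (out : List Int) : Prop := out = ctc_remove_blank_alt char_ids blank_id
instance (char_ids : List Int) (blank_id : Int) (out : List Int) : Decidable (Spec_ctc_remove_blank char_ids blank_id out) := by unfold Spec_ctc_remove_blank; infer_instance

-- ===== CLAIM (what is proved, stated in full; the proofs are below) =====
def Claim_equal_ctc_remove_blank : Prop := ∀ (char_ids : List Int) (blank_id : Int), Dom_ctc_remove_blank char_ids blank_id → Spec_ctc_remove_blank char_ids blank_id (ctc_remove_blank char_ids blank_id)

-- ===== LEMMAS AND PROOFS =====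

-- Functional characterisation of A's loop body (proof helper only).
def ctcGo (blank : Int) : List Int → Int → List Int
  | [], _ => []
  | x :: t, prev =>
      if x ≠ blank ∧ x ≠ prev then x :: ctcGo blank t x else ctcGo blank t x

-- Collapse-with-previous-value (proof helper only).
def ctcDedupFrom : Int → List Int → List Int
  | _, [] => []
  | p, x :: t => if x = p then ctcDedupFrom x t else x :: ctcDedupFrom x t

theorem ctc_foldl_eq_go (blank : Int) (xs : List Int) (acc : List Int) (prev : Int) :
    (xs.foldl
      (fun (st : List Int × Int) c =>
        (if c ≠ blank ∧ c ≠ st.2 then st.1 ++ [c] else st.1, c)) (acc, prev)).1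
    = acc ++ ctcGo blank xs prev := by
  induction xs generalizing acc prev with
  | nil => simp [ctcGo]
  | cons x t ih =>
      simp only [List.foldl_cons, ctcGo]
      by_cases h : x ≠ blank ∧ x ≠ prev
      · simp [h, ih]
      · simp [h, ih]

theorem ctc_go_eq_filter_dedupFrom (blank : Int) (xs : List Int) (prev : Int) :
    ctcGo blank xs prev = (ctcDedupFrom prev xs).filter (fun k => k ≠ blank) := by
  induction xs generalizing prev with
  | nil => simp [ctcGo, ctcDedupFrom]
  | cons x t ih =>
      simp only [ctcGo, ctcDedupFrom]
      by_cases hp : x = prev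
      · simp [hp, ih]
      · by_cases hb : x = blank
        · subst hb; simp [hp, ih]
        · simp [hp, hb, ih]

theorem ctc_groupKeys_eq_dedupFrom (x : Int) (t : List Int) :
    ctcGroupKeys (x :: t) = x :: ctcDedupFrom x t := by
  induction t generalizing x with
  | nil => simp [ctcGroupKeys, ctcDedupFrom]
  | cons y t' ih =>
      simp only [ctcGroupKeys, ctcDedupFrom]
      by_cases h : x = y
      · simp [h, ih]
      · have h' : ¬ y = x := fun hyx => h hyx.symm
        simp [h, h', ih]

-- ===== VERDICT (by name: the statement is the Claim_ definition above) =====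
theorem ctc_remove_blank_spec : Claim_equal_ctc_remove_blank := by
  intro char_ids blank_id _
  show ctc_remove_blank char_ids blank_id = ctc_remove_blank_alt char_ids blank_id
  unfold ctc_remove_blank ctc_remove_blank_alt
  rw [ctc_foldl_eq_go, List.nil_append, ctc_go_eq_filter_dedupFrom]
  cases char_ids with
  | nil => simp [ctcDedupFrom, ctcGroupKeys]
  | cons x t =>
      rw [ctc_groupKeys_eq_dedupFrom]
      simp only [ctcDedupFrom]
      by_cases hb : x = blank_id
      · simp [hb, List.filter]
      · simp [hb, List.filter]
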